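-- pv_equiv track=rewrite | github.com/isaacllewellyn/CSCI-4230-Group-4 | blumblumshub.py | BBS_chunk
-- ===== SOURCE A (Python) =====
-- def BBS_chunk(message, h, n, x):
--     cipher = 0
--     #Initiate Blum Goldwasser Probabilistic Encryption Algorithm
--     for i in range(int(len(bin(message)) / h) - 1,-1 , -1): #4. Iterate through each block
--         mask = 1 << h  # Set mask to field for most signifigant bit.
--         mask = mask - 1  # Invert to get least significant bit
--         x = pow(x, 2, n)  # 4.1 xi = ((xi-1)^2 mod n)
--         Pi = x & mask  # 4.2 Let Pi be the n least significant bits of x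
--         psudo = message >> (h * i)  # Get pseudorandom bits
--         Mi = psudo & mask
--         Ci = Pi ^ Mi  # 4.3 Ci = Pi xor our BBS
--         cipher <<= h #Add h bits to our msg
--         cipher |= Ci #BBS_chunk_encrypt(message, h , n ,x, i)# Encypt them and then OR them together to add Ci to our message
--     return cipher, x
-- ===== SOURCE B (Python) =====
-- def BBS_chunk(message, h, n, x):
--     blocks = int(len(bin(message)) / h)
--     # pass 1: the squaring chain alone, materialized as a keystream of low-h-bit words
--     keystream = []
--     for _ in range(blocks):
--         x = pow(x, 2, n)
--         keystream.append(x & ((1 << h) - 1))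
--     # pass 2: place each XORed block at its indexed position (word j goes at block blocks-1-j)
--     cipher = 0
--     for j, p in enumerate(keystream):
--         shift = h * (blocks - 1 - j)
--         cipher += (p ^ ((message >> shift) & ((1 << h) - 1))) << shift
--     return cipher, x
-- ===== Notes on version B (the rewrite author's own statement) =====
-- stated objective: alternative
-- what changed: A's single fused loop that squares, masks, XORs and shift-ORs the cipher together is replaced by two separate passes: one materializes the BBS keystream words alone, the other places each XORed message block at its bit position by indexed addition.
import Mathlib
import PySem

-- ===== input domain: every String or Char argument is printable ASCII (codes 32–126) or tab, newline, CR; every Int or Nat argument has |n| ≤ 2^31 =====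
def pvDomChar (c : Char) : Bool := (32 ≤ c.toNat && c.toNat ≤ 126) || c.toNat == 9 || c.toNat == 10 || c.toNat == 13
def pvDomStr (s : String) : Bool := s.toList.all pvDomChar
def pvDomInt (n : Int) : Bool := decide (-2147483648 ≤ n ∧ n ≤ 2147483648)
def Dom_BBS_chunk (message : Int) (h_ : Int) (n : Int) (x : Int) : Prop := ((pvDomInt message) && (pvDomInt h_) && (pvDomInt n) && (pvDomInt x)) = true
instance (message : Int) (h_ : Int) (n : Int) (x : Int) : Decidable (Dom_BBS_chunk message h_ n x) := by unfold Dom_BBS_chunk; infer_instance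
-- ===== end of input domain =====

-- B splits A's fused square/mask/XOR/shift-OR loop into a keystream pass plus an
-- indexed-placement pass (alternative decomposition; return value only, no speed claim).

-- ===== PORT A =====
-- Shift amounts are taken with .toNat: on every iteration the loop actually runs,
-- h_ > 0 and i ≥ 0 (an empty range is produced whenever h_ < 0), so this is exact.
def BBS_chunk (message : Int) (h_ : Int) (n : Int) (x : Int) : Int × Int :=
  (PySem.List.pyRange
      (PySem.Int.truncdiv ((PySem.Int.toBinChars0b message).length : Int) h_ - 1) (-1) (-1)).foldl
    (fun st i =>
      let mask := ((1 : Int) <<< h_.toNat) - 1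
      let x' := PySem.Int.powMod st.2 2 n
      let Pi := PySem.Int.band x' mask
      let psudo := message >>> (h_ * i).toNat
      let Mi := PySem.Int.band psudo mask
      let Ci := PySem.Int.bxor Pi Mi
      (PySem.Int.bor (st.1 <<< h_.toNat) Ci, x'))
    (0, x)

-- ===== PORT B =====
def BBS_chunk_alt (message : Int) (h_ : Int) (n : Int) (x : Int) : Int × Int :=
  let blocks := PySem.Int.truncdiv ((PySem.Int.toBinChars0b message).length : Int) h_
  let ks := (PySem.List.pyRange 0 blocks 1).foldl
    (fun st _x =>
      let x' := PySem.Int.powMod st.2 2 n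
      (st.1 ++ [PySem.Int.band x' (((1 : Int) <<< h_.toNat) - 1)], x'))
    ([], x)
  let cipher := (PySem.List.enumerate ks.1).foldl
    (fun c jp =>
      let shift := (h_ * (blocks - 1 - jp.1)).toNat
      c + (PySem.Int.bxor jp.2
            (PySem.Int.band (message >>> shift) (((1 : Int) <<< h_.toNat) - 1))) <<< shift)
    0
  (cipher, ks.2)

-- ===== PRECONDITION & SPEC =====
-- Pre_ excludes exactly the raising inputs: h = 0 (ZeroDivisionError in int(len/h)),
-- and n = 0 when at least one block is processed (pow() 3rd argument cannot be 0).
def Pre_BBS_chunk (message : Int) (h_ : Int) (n : Int) (_x : Int) : Prop :=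
  h_ ≠ 0 ∧ (n ≠ 0 ∨ PySem.Int.truncdiv ((PySem.Int.toBinChars0b message).length : Int) h_ ≤ 0)
instance (message : Int) (h_ : Int) (n : Int) (x : Int) : Decidable (Pre_BBS_chunk message h_ n x) := by unfold Pre_BBS_chunk; infer_instance
def pvWitness_BBS_chunk : Int × Int × Int × Int := (1000, 4, 77, 3)
def Spec_BBS_chunk (message : Int) (h_ : Int) (n : Int) (x : Int) (out : Int × Int) : Prop := out = BBS_chunk_alt message h_ n x
instance (message : Int) (h_ : Int) (n : Int) (x : Int) (out : Int × Int) : Decidable (Spec_BBS_chunk message h_ n x out) := by unfold Spec_BBS_chunk; infer_instance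

-- ===== CLAIM (what is proved, stated in full; the proofs are below) =====
def Claim_equal_BBS_chunk : Prop := ∀ (message : Int) (h_ : Int) (n : Int) (x : Int), Dom_BBS_chunk message h_ n x → Pre_BBS_chunk message h_ n x → Spec_BBS_chunk message h_ n x (BBS_chunk message h_ n x)

-- ===== LEMMAS AND PROOFS =====

-- keystream chain: the h_-bit words produced by the squaring chain, and the final x
def pvChain (n h_ : Int) (K : Nat) (x : Int) : List Int × Int :=
  match K with
  | 0 => ([], x)
  | K + 1 =>
    let x' := PySem.Int.powMod x 2 n
    let r := pvChain n h_ K x'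
    (PySem.Int.band x' (((1 : Int) <<< h_.toNat) - 1) :: r.1, r.2)

-- the cipher value produced by K blocks starting at x
def pvCip (message n h_ : Int) (K : Nat) (x : Int) : Int :=
  match K with
  | 0 => 0
  | K + 1 =>
    let x' := PySem.Int.powMod x 2 n
    (PySem.Int.bxor (PySem.Int.band x' (((1 : Int) <<< h_.toNat) - 1))
      (PySem.Int.band (message >>> (h_.toNat * K)) (((1 : Int) <<< h_.toNat) - 1))) * 2 ^ (h_.toNat * K)
    + pvCip message n h_ K x'

lemma pv_tdiv_nonpos (a b : Int) (ha : 0 ≤ a) (hb : b < 0) : a.tdiv b ≤ 0 := by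
  lift a to Nat using ha with m
  cases b with
  | ofNat nn => exact absurd hb (by simp [Int.ofNat_eq_natCast])
  | negSucc nn =>
      show -((m / (nn + 1) : Nat) : Int) ≤ 0
      exact neg_nonpos_of_nonneg (Int.natCast_nonneg _)

lemma pv_nat_or_add (a b k : Nat) (hb : b < 2 ^ k) : a <<< k ||| b = a * 2 ^ k + b := by
  have hmod : (a <<< k ||| b) % 2 ^ k = b := by
    rw [← Nat.and_two_pow_sub_one_eq_mod, Nat.and_or_distrib_right,
        Nat.and_two_pow_sub_one_eq_mod, Nat.and_two_pow_sub_one_eq_mod,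
        Nat.shiftLeft_eq, Nat.mul_mod_left, Nat.mod_eq_of_lt hb]
    simp
  have hdiv : (a <<< k ||| b) / 2 ^ k = a := by
    rw [← Nat.shiftRight_eq_div_pow, Nat.shiftRight_or_distrib,
        Nat.shiftLeft_shiftRight, Nat.shiftRight_eq_div_pow, Nat.div_eq_of_lt hb]
    simp
  have hdm := Nat.div_add_mod (a <<< k ||| b) (2 ^ k)
  rw [hdiv, hmod] at hdm
  linarith

lemma pv_mask_cast (k : Nat) : ((1 : Int) <<< k) - 1 = ((2 ^ k - 1 : Nat) : Int) := by
  have h1 : (1 : Nat) ≤ 2 ^ k := Nat.one_le_two_pow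
  rw [Int.shiftLeft_eq, one_mul, Nat.cast_sub h1]
  push_cast; ring

lemma pv_band_mask_bounds (a : Int) (k : Nat) :
    0 ≤ PySem.Int.band a (((1 : Int) <<< k) - 1) ∧ PySem.Int.band a (((1 : Int) <<< k) - 1) < 2 ^ k := by
  have h1 : (1 : Nat) ≤ 2 ^ k := Nat.one_le_two_pow
  rw [pv_mask_cast]
  by_cases ha : 0 ≤ a
  · rw [PySem.Int.band_of_nonneg ha (by positivity)]
    have hle : a.toNat &&& ((2 ^ k - 1 : Nat) : Int).toNat ≤ 2 ^ k - 1 := by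
      rw [Int.toNat_natCast]; exact Nat.and_le_right
    constructor
    · positivity
    · exact_mod_cast lt_of_le_of_lt hle (by omega)
  · unfold PySem.Int.band
    rw [if_neg ha, if_pos (by positivity)]
    have hle : ((2 ^ k - 1 : Nat) : Int).toNat - (((2 ^ k - 1 : Nat) : Int).toNat &&& (-a - 1).toNat) ≤ 2 ^ k - 1 := by
      rw [Int.toNat_natCast]; omega
    constructor
    · positivity
    · exact_mod_cast lt_of_le_of_lt hle (by omega)

lemma pv_bxor_bounds (p m : Int) (k : Nat) (hp0 : 0 ≤ p) (hp : p < 2 ^ k)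
    (hm0 : 0 ≤ m) (hm : m < 2 ^ k) :
    0 ≤ PySem.Int.bxor p m ∧ PySem.Int.bxor p m < 2 ^ k := by
  lift p to Nat using hp0 with a
  lift m to Nat using hm0 with b
  rw [PySem.Int.bxor_natCast]
  have := Nat.xor_lt_two_pow (n := k) (by exact_mod_cast hp) (by exact_mod_cast hm)
  constructor
  · positivity
  · exact_mod_cast this

lemma pv_or_add (c C : Int) (k : Nat) (hc : 0 ≤ c) (hC0 : 0 ≤ C) (hC : C < 2 ^ k) :
    PySem.Int.bor (c <<< k) C = c * 2 ^ k + C := by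
  lift c to Nat using hc with a
  lift C to Nat using hC0 with b
  have hsl : ((a : Nat) : Int) <<< k = ((a <<< k : Nat) : Int) := by
    rw [Int.shiftLeft_eq, Nat.shiftLeft_eq]; push_cast; ring
  rw [hsl, PySem.Int.bor_natCast, pv_nat_or_add a b k (by exact_mod_cast hC)]
  push_cast; ring

lemma pv_mul_toNat (h_ : Int) (hh : 0 ≤ h_) (K : Nat) : (h_ * (K : Int)).toNat = h_.toNat * K := by
  lift h_ to Nat using hh with a
  rw [← Nat.cast_mul, Int.toNat_natCast, Int.toNat_natCast]

lemma pv_A_loop (message n h_ : Int) (hh : 0 ≤ h_) (K : Nat) :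
    ∀ (x c : Int), 0 ≤ c →
    (PySem.List.pyRange ((K : Int) - 1) (-1) (-1)).foldl
      (fun st i =>
        let mask := ((1 : Int) <<< h_.toNat) - 1
        let x' := PySem.Int.powMod st.2 2 n
        let Pi := PySem.Int.band x' mask
        let psudo := message >>> (h_ * i).toNat
        let Mi := PySem.Int.band psudo mask
        let Ci := PySem.Int.bxor Pi Mi
        (PySem.Int.bor (st.1 <<< h_.toNat) Ci, x'))
      (c, x)
    = (c * 2 ^ (h_.toNat * K) + pvCip message n h_ K x, (pvChain n h_ K x).2) := by
  induction K with
  | zero =>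
      intro x c hc
      rw [PySem.List.pyRange_neg_one_eq_nil (by omega)]
      simp [pvCip, pvChain]
  | succ K ih =>
      intro x c hc
      have e1 : ((K + 1 : Nat) : Int) - 1 = (K : Int) := by push_cast; ring
      rw [e1, PySem.List.pyRange_neg_one_cons (by omega), List.foldl_cons]
      dsimp only
      rw [pv_mul_toNat h_ hh K]
      obtain ⟨hp0, hp1⟩ := pv_band_mask_bounds (PySem.Int.powMod x 2 n) h_.toNat
      obtain ⟨hm0, hm1⟩ := pv_band_mask_bounds (message >>> (h_.toNat * K)) h_.toNat
      obtain ⟨hC0, hC1⟩ := pv_bxor_bounds _ _ h_.toNat hp0 hp1 hm0 hm1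
      rw [pv_or_add c _ h_.toNat hc hC0 hC1]
      rw [ih (PySem.Int.powMod x 2 n) _ (by positivity)]
      refine Prod.ext ?_ ?_
      · show _ = c * 2 ^ (h_.toNat * (K + 1)) + pvCip message n h_ (K + 1) x
        simp only [pvCip, Nat.mul_succ, pow_add]
        ring
      · show (pvChain n h_ K (PySem.Int.powMod x 2 n)).2 = (pvChain n h_ (K + 1) x).2
        simp [pvChain]

lemma pv_B_ks (n h_ : Int) (l : List Int) :
    ∀ (acc : List Int) (x : Int),
    l.foldl
      (fun st _ =>
        let x' := PySem.Int.powMod st.2 2 n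
        (st.1 ++ [PySem.Int.band x' (((1 : Int) <<< h_.toNat) - 1)], x'))
      (acc, x)
    = (acc ++ (pvChain n h_ l.length x).1, (pvChain n h_ l.length x).2) := by
  induction l with
  | nil => intro acc x; simp [pvChain]
  | cons y t ih =>
      intro acc x
      rw [List.foldl_cons]
      dsimp only
      rw [ih]
      simp [pvChain]

lemma pv_B_sum (message n h_ : Int) (hh : 0 ≤ h_) (K : Nat) :
    ∀ (x B : Int),
    ((PySem.List.enumerate (pvChain n h_ K x).1 (B - K)).map
      (fun jp => (PySem.Int.bxor jp.2
          (PySem.Int.band (message >>> (h_ * (B - 1 - jp.1)).toNat) (((1 : Int) <<< h_.toNat) - 1)))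
        <<< (h_ * (B - 1 - jp.1)).toNat)).sum
    = pvCip message n h_ K x := by
  induction K with
  | zero =>
      intro x B
      simp [pvChain, PySem.List.enumerate_nil, pvCip]
  | succ K ih =>
      intro x B
      show ((PySem.List.enumerate
              (PySem.Int.band (PySem.Int.powMod x 2 n) (((1 : Int) <<< h_.toNat) - 1)
                :: (pvChain n h_ K (PySem.Int.powMod x 2 n)).1) (B - ((K + 1 : Nat) : Int))).map _).sum = _
      rw [PySem.List.enumerate_cons, List.map_cons, List.sum_cons]
      have e2 : B - ((K + 1 : Nat) : Int) + 1 = B - (K : Int) := by push_cast; ring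
      rw [e2, ih (PySem.Int.powMod x 2 n) B]
      have e3 : h_ * (B - 1 - (B - ((K + 1 : Nat) : Int))) = h_ * (K : Int) := by push_cast; ring
      dsimp only
      rw [e3, pv_mul_toNat h_ hh K, Int.shiftLeft_eq]
      simp only [pvCip]

theorem pv_ports_eq (message h_ n x : Int) :
    BBS_chunk message h_ n x = BBS_chunk_alt message h_ n x := by
  unfold BBS_chunk BBS_chunk_alt
  dsimp only
  by_cases hpos : 0 < PySem.Int.truncdiv ((PySem.Int.toBinChars0b message).length : Int) h_
  · have hh : 0 ≤ h_ := by
      by_contra hneg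
      push Not at hneg
      have : PySem.Int.truncdiv ((PySem.Int.toBinChars0b message).length : Int) h_ ≤ 0 :=
        pv_tdiv_nonpos _ _ (Int.natCast_nonneg _) hneg
      omega
    have hbK : PySem.Int.truncdiv ((PySem.Int.toBinChars0b message).length : Int) h_
        = ((PySem.Int.truncdiv ((PySem.Int.toBinChars0b message).length : Int) h_).toNat : Int) :=
      (Int.toNat_of_nonneg (le_of_lt hpos)).symm
    set K : Nat := (PySem.Int.truncdiv ((PySem.Int.toBinChars0b message).length : Int) h_).toNat with hKdef
    rw [hbK]
    rw [pv_A_loop message n h_ hh K x 0 le_rfl]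
    have hlen : (PySem.List.pyRange 0 (K : Int) 1).length = K := by
      rw [PySem.List.length_pyRange_one]; simp
    rw [pv_B_ks n h_ (PySem.List.pyRange 0 (K : Int) 1) [] x, hlen]
    dsimp only
    simp only [List.nil_append, zero_mul, zero_add]
    rw [PySem.List.foldl_add]
    have hs := pv_B_sum message n h_ hh K x (K : Int)
    simp only [sub_self] at hs
    rw [hs, zero_add]
  · push Not at hpos
    rw [PySem.List.pyRange_neg_one_eq_nil (by omega), PySem.List.pyRange_one_eq_nil (by omega)]
    simp [PySem.List.enumerate_nil]

-- ===== VERDICT (by name: the statement is the Claim_ definition above) =====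
theorem BBS_chunk_spec : Claim_equal_BBS_chunk := by
  intro message h_ n x _ _
  unfold Spec_BBS_chunk
  exact pv_ports_eq message h_ n x
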